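-- pv_equiv track=rewrite | github.com/leviroth/practice-problems | day4.py | find_parent_chain
-- ===== SOURCE A (Python) =====
-- def find_parent_chain(parents, node):
--     chain = []
--     cur = node
--     while cur is not None:
--         chain.append(cur)
--         cur = parents[cur]
--     chain.reverse()
--     return chain
-- ===== SOURCE B (Python) =====
-- def find_parent_chain(parents, node):
--     def go(cur, acc):
--         if cur is None:
--             return acc
--         return go(parents[cur], [cur] + acc)
--     return go(node, [])
-- ===== Notes on version B (the rewrite author's own statement) =====
-- stated objective: simpler
-- what changed: Replaces the append-then-reverse loop with a tail-recursive helper that prepends each node to an accumulator, so the root-first chain is built directly and no reverse pass is needed.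
import Mathlib
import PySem

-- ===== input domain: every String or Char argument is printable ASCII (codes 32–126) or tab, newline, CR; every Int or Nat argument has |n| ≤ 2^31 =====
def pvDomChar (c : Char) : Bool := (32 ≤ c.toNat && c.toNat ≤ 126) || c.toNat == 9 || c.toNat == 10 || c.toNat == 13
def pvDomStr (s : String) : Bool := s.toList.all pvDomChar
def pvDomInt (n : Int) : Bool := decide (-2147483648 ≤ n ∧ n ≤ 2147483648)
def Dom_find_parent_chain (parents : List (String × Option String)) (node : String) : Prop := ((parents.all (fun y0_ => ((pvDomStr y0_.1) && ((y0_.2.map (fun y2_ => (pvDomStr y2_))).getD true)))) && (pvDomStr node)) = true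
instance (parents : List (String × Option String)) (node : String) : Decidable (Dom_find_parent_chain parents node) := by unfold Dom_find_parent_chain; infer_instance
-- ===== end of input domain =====

-- B replaces A's append-then-reverse loop by a tail-recursive helper that prepends each
-- node to an accumulator, building the root-first chain directly (objective: simpler).

-- ===== PORT A =====
-- A's while-loop: append cur to chain, then cur = parents[cur]; finally reverse.
-- Fuel (parents.length + 2) is a totality guard only: on every input admitted by Pre_
-- the chain is shorter than the fuel.  A missing key (Python KeyError) is outside Pre_.
def pvLoopA (parents : List (String × Option String)) : Nat → Option String → List String → List String
  | 0, _, chain => chain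
  | _ + 1, none, chain => chain
  | fuel + 1, some c, chain =>
      match PySem.Dict.get? (PySem.Dict.mk parents) c with
      | none => chain ++ [c]            -- KeyError in Python (outside Pre_)
      | some p => pvLoopA parents fuel p (chain ++ [c])

def find_parent_chain (parents : List (String × Option String)) (node : String) : List String :=
  (pvLoopA parents (parents.length + 2) (some node) []).reverse

-- ===== PORT B =====
-- B's helper go(cur, acc): acc when cur is None, else go(parents[cur], [cur] + acc).
-- Same fuel guard.  On a missing key (Python KeyError, outside Pre_) the lookup `.getD
-- none` stops the walk at the next step.
def pvGoB (d : PySem.Dict String (Option String)) : Nat → Option String → List String → List String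
  | 0, _, acc => acc
  | fuel + 1, cur, acc =>
      match cur with
      | none => acc
      | some c => pvGoB d fuel ((PySem.Dict.get? d c).getD none) (c :: acc)

def find_parent_chain_alt (parents : List (String × Option String)) (node : String) : List String :=
  pvGoB (PySem.Dict.mk parents) (parents.length + 2) (some node) []

-- ===== PRECONDITION & SPEC =====
-- Pre_ holds exactly when A returns normally: every ancestor of node (following the
-- parent pointers) has an entry and the chain ends at a None root — otherwise A raises
-- KeyError (missing entry) or loops forever (a cycle).  pvChainOk is a shape check on the
-- input graph: it walks node's ancestor entries, bounded by the number of entries (a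
-- terminating chain never revisits a key, so it visits at most parents.length of them).
def pvChainOk (parents : List (String × Option String)) : Nat → String → Bool
  | 0, _ => false
  | fuel + 1, k =>
      match PySem.Dict.get? (PySem.Dict.mk parents) k with
      | none => false          -- missing entry: KeyError
      | some none => true      -- k is a root
      | some (some p) => pvChainOk parents fuel p

def Pre_find_parent_chain (parents : List (String × Option String)) (node : String) : Prop :=
  pvChainOk parents (parents.length + 1) node = true
instance (parents : List (String × Option String)) (node : String) : Decidable (Pre_find_parent_chain parents node) := by unfold Pre_find_parent_chain; infer_instance

def pvWitness_find_parent_chain : (List (String × Option String)) × String :=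
  ([("b", none), ("a", some "b"), ("c", some "a")], "c")

def Spec_find_parent_chain (parents : List (String × Option String)) (node : String) (out : List String) : Prop := out = find_parent_chain_alt parents node
instance (parents : List (String × Option String)) (node : String) (out : List String) : Decidable (Spec_find_parent_chain parents node out) := by unfold Spec_find_parent_chain; infer_instance

-- ===== CLAIM (what is proved, stated in full; the proofs are below) =====
def Claim_equal_find_parent_chain : Prop := ∀ (parents : List (String × Option String)) (node : String), Dom_find_parent_chain parents node → Pre_find_parent_chain parents node → Spec_find_parent_chain parents node (find_parent_chain parents node)

-- ===== LEMMAS AND PROOFS =====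
-- A's accumulator loop, read backwards, is exactly B's prepending recursion.
theorem pvLoopA_reverse (parents : List (String × Option String)) :
    ∀ (fuel : Nat) (cur : Option String) (acc : List String),
      (pvLoopA parents fuel cur acc).reverse
        = pvGoB (PySem.Dict.mk parents) fuel cur acc.reverse := by
  intro fuel
  induction fuel with
  | zero => intro cur acc; simp [pvLoopA, pvGoB]
  | succ f ih =>
      intro cur acc
      cases cur with
      | none => simp [pvLoopA, pvGoB]
      | some c =>
          simp only [pvLoopA, pvGoB]
          cases h : PySem.Dict.get? (PySem.Dict.mk parents) c with
          | none =>
              -- KeyError branch: B's walk stops at the next step (or fuel runs out).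
              cases f with
              | zero => simp [pvGoB]
              | succ f' => simp [pvGoB]
          | some p => simpa using ih p (acc ++ [c])

-- ===== VERDICT (by name: the statement is the Claim_ definition above) =====
theorem find_parent_chain_spec : Claim_equal_find_parent_chain := by
  intro parents node _ _
  unfold Spec_find_parent_chain find_parent_chain find_parent_chain_alt
  simpa using pvLoopA_reverse parents (parents.length + 2) (some node) []
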